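-- pv_equiv track=rewrite | github.com/jramos54/emojis | SRC/main.py | to_emojis
-- ===== SOURCE A (Python) =====
-- nums = ['1','2','3','4','5','6','7','8','9','0']
--
-- def to_emojis(emojicode):
--     emojis = ""
--     for code in emojicode.split(' '):
--         decimal = ""
--         for emoji in code:
--             numers = ""
--             for u in emoji:
--                 if u in nums:
--                     numers += u
--             decimal += numers
--
--         emojis += chr(int(decimal))
--
--
--
--
--     return emojis
-- ===== SOURCE B (Python) =====
-- def to_emojis(emojicode):
--     # single left-to-right pass: flush the digit buffer at each space and once at the end
--     out = []
--     buffer = ""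
--     for ch in emojicode:
--         if ch == ' ':
--             out.append(chr(int(buffer)))
--             buffer = ""
--         elif '0' <= ch <= '9':
--             buffer += ch
--     out.append(chr(int(buffer)))
--     return "".join(out)
-- ===== Notes on version B (the rewrite author's own statement) =====
-- stated objective: alternative
-- what changed: B replaces A's split(' ') plus three nested loops over tokens with a single left-to-right pass over the raw string that keeps a digit buffer, flushing chr(int(buffer)) at each space and once at the end.
-- outside the precondition, e.g. on to_emojis(' '): A raises ValueError, B raises ValueError
import Mathlib
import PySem

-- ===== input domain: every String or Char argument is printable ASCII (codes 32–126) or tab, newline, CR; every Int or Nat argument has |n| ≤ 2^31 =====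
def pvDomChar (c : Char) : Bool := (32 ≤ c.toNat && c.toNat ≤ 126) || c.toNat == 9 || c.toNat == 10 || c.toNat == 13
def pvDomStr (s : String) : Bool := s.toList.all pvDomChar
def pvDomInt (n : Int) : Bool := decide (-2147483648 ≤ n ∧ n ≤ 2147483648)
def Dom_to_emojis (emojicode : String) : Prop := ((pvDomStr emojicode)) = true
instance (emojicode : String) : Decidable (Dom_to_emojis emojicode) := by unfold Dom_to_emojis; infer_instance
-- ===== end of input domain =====

-- ===== PORT A =====
-- B is a single left-to-right pass with a digit buffer instead of A's split-then-nested-loops; return-value equivalence on Pre_.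
def nums : List Char := ['1','2','3','4','5','6','7','8','9','0']

-- chr(int(buf)): total stand-in; Pre_ guarantees buf is a nonempty digit string naming a valid scalar value
def pvChrInt (buf : List Char) : Char :=
  Char.ofNat ((PySem.Int.ofChars? buf).getD 0).toNat

def to_emojis (emojicode : String) : String :=
  let emojis : List Char :=
    (PySem.Chars.splitOn emojicode.toList [' ']).foldl
      (fun emojis code =>
        let decimal : List Char :=
          code.foldl
            (fun decimal emoji =>
              let numers : List Char :=
                [emoji].foldl (fun numers u => if u ∈ nums then numers ++ [u] else numers) []
              decimal ++ numers) []
        emojis ++ [pvChrInt decimal]) []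
  String.ofList emojis

-- ===== PORT B =====
-- the body of B's loop: flush the buffer on ' ', extend it on a digit, skip anything else
def pvStep (st : List Char × List Char) (ch : Char) : List Char × List Char :=
  if ch = ' ' then (st.1 ++ [pvChrInt st.2], [])
  else if '0' ≤ ch ∧ ch ≤ '9' then (st.1, st.2 ++ [ch])
  else st

def to_emojis_alt (emojicode : String) : String :=
  let st := emojicode.toList.foldl pvStep ([], [])
  String.ofList (st.1 ++ [pvChrInt st.2])

-- ===== PRECONDITION & SPEC =====
def pvIsDigit (c : Char) : Bool := decide ('0' ≤ c ∧ c ≤ '9')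

-- the space-separated tokens of the input: (head token, remaining tokens)
def pvSplit : List Char → List Char × List (List Char)
  | [] => ([], [])
  | c :: s =>
    let r := pvSplit s
    if c = ' ' then ([], r.1 :: r.2) else (c :: r.1, r.2)

-- a token is OK when its digits are nonempty (else int('') raises ValueError) and name a Unicode
-- scalar value (else chr raises, or returns a lone surrogate that is not a representable String)
def pvTokenOk (t : List Char) : Bool :=
  let d := t.filter pvIsDigit
  let n := ((PySem.Int.ofChars? d).getD 0).toNat
  decide (d ≠ []) && (decide (n < 55296) || (decide (57343 < n) && decide (n < 1114112)))

-- Pre_ excludes inputs where A raises (a token with no digits, or a value ≥ 0x110000), and tokens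
-- whose value is a surrogate code point, where A returns a lone-surrogate str not representable as a Lean String.
def Pre_to_emojis (emojicode : String) : Prop :=
  pvTokenOk (pvSplit emojicode.toList).1 = true ∧
  ∀ t ∈ (pvSplit emojicode.toList).2, pvTokenOk t = true
instance (emojicode : String) : Decidable (Pre_to_emojis emojicode) := by
  unfold Pre_to_emojis; infer_instance

def pvWitness_to_emojis : String := "128512 65 128513"

def Spec_to_emojis (emojicode : String) (out : String) : Prop := out = to_emojis_alt emojicode
instance (emojicode : String) (out : String) : Decidable (Spec_to_emojis emojicode out) := by unfold Spec_to_emojis; infer_instance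

-- ===== CLAIM (what is proved, stated in full; the proofs are below) =====
def Claim_equal_to_emojis : Prop := ∀ (emojicode : String), Dom_to_emojis emojicode → Pre_to_emojis emojicode → Spec_to_emojis emojicode (to_emojis emojicode)

-- ===== LEMMAS AND PROOFS =====

theorem mem_nums_iff (c : Char) : c ∈ nums ↔ ('0' ≤ c ∧ c ≤ '9') := by
  constructor
  · intro h; fin_cases h <;> exact ⟨by decide, by decide⟩
  · rintro ⟨h1, h2⟩
    obtain ⟨hv1, hv2⟩ : 48 ≤ c.toNat ∧ c.toNat ≤ 57 := ⟨Nat.succ_le_of_lt h1, h2⟩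
    have he := (Char.ofNat_toNat c).symm
    interval_cases hn : c.toNat <;> rw [he] <;> decide

-- splitting on a single space equals the simple structural split pvSplit
theorem splitOn_go_space (fuel : Nat) (l cur : List Char) (acc : List (List Char))
    (h : l.length < fuel) :
    PySem.Chars.splitOn.go [' '] fuel l cur acc
      = acc.reverse ++ (cur.reverse ++ (pvSplit l).1) :: (pvSplit l).2 := by
  induction fuel generalizing l cur acc with
  | zero => omega
  | succ n ih =>
    cases l with
    | nil => simp [PySem.Chars.splitOn.go, pvSplit]
    | cons c rest =>
      rw [PySem.Chars.splitOn.go]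
      by_cases hc : c = ' '
      · subst hc
        simp only [List.isPrefixOf, BEq.rfl, Bool.true_and, if_pos]
        rw [show List.drop [' '].length (' ' :: rest) = rest from rfl]
        rw [ih rest [] (cur.reverse :: acc) (by simpa using Nat.lt_of_succ_lt_succ h)]
        simp [pvSplit]
      · have hpre : ([' '].isPrefixOf (c :: rest)) = false := by
          simp [List.isPrefixOf]; exact fun hh => absurd hh.symm hc
        rw [hpre]
        simp only [Bool.false_eq_true, if_false]
        rw [ih rest (c :: cur) acc (by simpa using Nat.lt_of_succ_lt_succ h)]
        simp [pvSplit, hc]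

theorem splitOn_space (s : List Char) :
    PySem.Chars.splitOn s [' '] = (pvSplit s).1 :: (pvSplit s).2 := by
  have := splitOn_go_space (s.length + 1) s [] [] (by omega)
  simpa [PySem.Chars.splitOn] using this

-- A's two inner loops filter the digits of a token
theorem a_inner (code : List Char) (d : List Char) :
    code.foldl
      (fun decimal emoji =>
        decimal ++ [emoji].foldl (fun numers u => if u ∈ nums then numers ++ [u] else numers) [])
      d = d ++ code.filter pvIsDigit := by
  induction code generalizing d with
  | nil => simp
  | cons c rest ih =>
    rw [List.foldl_cons, ih]
    by_cases hc : pvIsDigit c = true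
    · have hm : c ∈ nums := (mem_nums_iff c).2 (by simpa [pvIsDigit] using hc)
      simp [List.filter_cons, hc, hm]
    · have hm : c ∉ nums := fun h => hc (by simpa [pvIsDigit] using (mem_nums_iff c).1 h)
      simp [List.filter_cons, hc, hm]

-- A's outer loop maps pvChrInt over the filtered tokens
theorem a_outer (ts : List (List Char)) (em : List Char) :
    ts.foldl
      (fun emojis code =>
        emojis ++ [pvChrInt (code.foldl
          (fun decimal emoji =>
            decimal ++ [emoji].foldl (fun numers u => if u ∈ nums then numers ++ [u] else numers) [])
          [])]) em
      = em ++ ts.map (fun t => pvChrInt (t.filter pvIsDigit)) := by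
  induction ts generalizing em with
  | nil => simp
  | cons t rest ih => rw [List.foldl_cons, ih, a_inner t []]; simp

-- B's single pass over the raw characters produces the same per-token emissions
theorem b_pass (s : List Char) (out buf : List Char) :
    (s.foldl pvStep (out, buf)).1 ++ [pvChrInt (s.foldl pvStep (out, buf)).2]
      = out ++ pvChrInt (buf ++ (pvSplit s).1.filter pvIsDigit)
          :: ((pvSplit s).2.map (fun t => pvChrInt (t.filter pvIsDigit))) := by
  induction s generalizing out buf with
  | nil => simp [pvSplit]
  | cons c rest ih =>
    simp only [List.foldl_cons]
    by_cases hc : c = ' '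
    · subst hc
      rw [show pvStep (out, buf) ' ' = (out ++ [pvChrInt buf], []) from by simp [pvStep]]
      rw [ih (out ++ [pvChrInt buf]) []]
      simp [pvSplit]
    · by_cases hd : ('0' ≤ c ∧ c ≤ '9')
      · rw [show pvStep (out, buf) c = (out, buf ++ [c]) from by simp [pvStep, hc, hd]]
        rw [ih out (buf ++ [c])]
        have hdig : pvIsDigit c = true := by simpa [pvIsDigit] using hd
        simp [pvSplit, hc, hdig]
      · rw [show pvStep (out, buf) c = (out, buf) from by simp [pvStep, hc, hd]]
        rw [ih out buf]
        have hdig : pvIsDigit c = false := by simpa [pvIsDigit] using hd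
        simp [pvSplit, hc, hdig]

-- ===== VERDICT (by name: the statement is the Claim_ definition above) =====
theorem to_emojis_spec : Claim_equal_to_emojis := by
  intro s _ _
  unfold Spec_to_emojis
  simp only [to_emojis, to_emojis_alt]
  rw [splitOn_space, a_outer, b_pass s.toList [] []]
  simp
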